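-- pv_equiv track=rewrite | github.com/MoHossam10/End-To-End-Chatting-App | AES_Algorithm.py | RotWord
-- ===== SOURCE A (Python) =====
-- def RotWord(word,repetation,direction):
--     for rep in range(repetation):
--         if direction==1:
--             for index in range(1,len(word)):
--                 temp=word[index]
--                 word[index]=word[index-1]
--                 word[index-1]=temp
--         elif direction==2:
--             for index in reversed(range(0,len(word)-1)):
--                 temp=word[index]
--                 word[index]=word[index+1]
--                 word[index+1]=temp
--     return word
-- ===== SOURCE B (Python) =====
-- def RotWord(word, repetation, direction):
--     # Return-value equivalent to A; like A it mutates and returns the same list object.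
--     n = len(word)
--     if repetation > 0 and n > 1 and direction in (1, 2):
--         k = repetation % n if direction == 1 else (-repetation) % n
--         word[:] = word[k:] + word[:k]
--     return word
-- ===== Notes on version B (the rewrite author's own statement) =====
-- stated objective: alternative
-- what changed: Replaces repetation full passes of adjacent swaps with a single slice-based rotation computed from repetation mod len (direction 1 left, direction 2 right); intended as asymptotically cheaper (O(n) vs O(repetation*n)) but a timing run read only 1.37x, so no speed claim is made.
import Mathlib
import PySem

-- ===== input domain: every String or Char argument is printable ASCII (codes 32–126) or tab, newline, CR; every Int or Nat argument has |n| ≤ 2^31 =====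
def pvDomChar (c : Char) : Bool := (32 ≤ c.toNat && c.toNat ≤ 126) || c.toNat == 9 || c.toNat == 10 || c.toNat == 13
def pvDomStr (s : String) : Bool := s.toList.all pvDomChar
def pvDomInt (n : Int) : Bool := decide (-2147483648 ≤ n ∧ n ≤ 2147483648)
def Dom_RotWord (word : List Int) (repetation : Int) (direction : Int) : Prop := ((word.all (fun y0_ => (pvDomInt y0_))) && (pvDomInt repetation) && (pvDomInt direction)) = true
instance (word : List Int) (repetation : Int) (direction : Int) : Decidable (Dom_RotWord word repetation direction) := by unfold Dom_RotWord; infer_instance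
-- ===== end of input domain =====

-- B replaces A's repetation adjacent-swap passes by a single slice-based rotation with a modular step count
-- (an alternative algorithm; timing run read only 1.37x at the largest size, so no speed claim is made);
-- both Pythons mutate and return the passed list, so return-value equivalence covers the side effect too.

-- ===== PORT A =====
-- body of A's inner direction-1 loop: swap word[index] with word[index-1]
def pvStepL (w : List Int) (index : Nat) : List Int :=
  let temp := w.getD index 0
  let w' := w.set index (w.getD (index - 1) 0)
  w'.set (index - 1) temp

-- body of A's inner direction-2 loop: swap word[index] with word[index+1]
def pvStepR (w : List Int) (index : Nat) : List Int :=
  let temp := w.getD index 0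
  let w' := w.set index (w.getD (index + 1) 0)
  w'.set (index + 1) temp

def RotWord (word : List Int) (repetation : Int) (direction : Int) : List Int :=
  (PySem.List.pyRange 0 repetation 1).foldl (fun w _rep =>
    if direction = 1 then
      -- for index in range(1, len(word)): swap word[index], word[index-1]
      (List.range' 1 (w.length - 1)).foldl pvStepL w
    else if direction = 2 then
      -- for index in reversed(range(0, len(word)-1)): swap word[index], word[index+1]
      ((List.range (w.length - 1)).reverse).foldl pvStepR w
    else w) word

-- ===== PORT B =====
def RotWord_alt (word : List Int) (repetation : Int) (direction : Int) : List Int :=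
  let n : Int := word.length
  if repetation > 0 ∧ n > 1 ∧ (direction = 1 ∨ direction = 2) then
    let k : Int := if direction = 1 then PySem.Int.mod repetation n else PySem.Int.mod (-repetation) n
    PySem.List.slice word (some k) none ++ PySem.List.slice word none (some k)
  else word

-- ===== PRECONDITION & SPEC =====
def Spec_RotWord (word : List Int) (repetation : Int) (direction : Int) (out : List Int) : Prop := out = RotWord_alt word repetation direction
instance (word : List Int) (repetation : Int) (direction : Int) (out : List Int) : Decidable (Spec_RotWord word repetation direction out) := by unfold Spec_RotWord; infer_instance

-- ===== CLAIM (what is proved, stated in full; the proofs are below) =====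
def Claim_equal_RotWord : Prop := ∀ (word : List Int) (repetation : Int) (direction : Int), Dom_RotWord word repetation direction → Spec_RotWord word repetation direction (RotWord word repetation direction)

-- ===== LEMMAS AND PROOFS =====

theorem pvStepL_cons (x : Int) (w : List Int) (j : Nat) :
    pvStepL (x :: w) (j + 2) = x :: pvStepL w (j + 1) := by
  simp [pvStepL]

theorem foldl_stepL_shift (n : Nat) : ∀ (t : Nat) (x : Int) (w : List Int),
    (List.range' (t + 2) n).foldl pvStepL (x :: w) = x :: (List.range' (t + 1) n).foldl pvStepL w := by
  induction n with
  | zero => intro t x w; simp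
  | succ m ih =>
    intro t x w
    rw [List.range'_succ, List.range'_succ, List.foldl_cons, List.foldl_cons, pvStepL_cons x w t]
    exact ih (t + 1) x _

theorem passL_eq (l : List Int) : ∀ (a : Int),
    (List.range' 1 l.length).foldl pvStepL (a :: l) = l ++ [a] := by
  induction l with
  | nil => intro a; simp
  | cons b t ih =>
    intro a
    rw [List.length_cons, List.range'_succ, List.foldl_cons]
    have h1 : pvStepL (a :: b :: t) 1 = b :: a :: t := by simp [pvStepL]
    rw [h1]
    rw [show (1 : Nat) + 1 = 0 + 2 from rfl, foldl_stepL_shift t.length 0 b (a :: t)]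
    rw [ih a]
    simp

theorem passA1_rotate (w : List Int) :
    (List.range' 1 (w.length - 1)).foldl pvStepL w = w.rotate 1 := by
  cases w with
  | nil => simp
  | cons a l => simpa using passL_eq l a

theorem length_pvStepR (w : List Int) (i : Nat) : (pvStepR w i).length = w.length := by
  simp [pvStepR]

theorem pvStepR_cons (x : Int) (w : List Int) (j : Nat) :
    pvStepR (x :: w) (j + 1) = x :: pvStepR w j := by
  simp [pvStepR]

theorem pvStepR_last_swap : ∀ (t : List Int) (b a : Int),
    pvStepR (t ++ [b, a]) t.length = t ++ [a, b] := by
  intro t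
  induction t with
  | nil => intro b a; rfl
  | cons x t ih =>
    intro b a
    rw [List.cons_append, List.length_cons, pvStepR_cons, ih]
    simp

theorem pvStepR_append (w : List Int) (b : Int) (i : Nat) (h : i + 1 < w.length) :
    pvStepR (w ++ [b]) i = pvStepR w i ++ [b] := by
  unfold pvStepR
  rw [List.getD_append _ _ _ _ (by omega), List.getD_append _ _ _ _ h,
      List.set_append_left _ _ (by omega), List.set_append_left]
  simp [h]

theorem foldl_stepR_append : ∀ (t : List Nat) (w : List Int) (b : Int),
    (∀ i ∈ t, i + 1 < w.length) →
    t.foldl pvStepR (w ++ [b]) = t.foldl pvStepR w ++ [b] := by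
  intro t
  induction t with
  | nil => intro w b _; rfl
  | cons i t ih =>
    intro w b h
    rw [List.foldl_cons, List.foldl_cons, pvStepR_append w b i (h i (by simp))]
    exact ih (pvStepR w i) b (fun j hj => by rw [length_pvStepR]; exact h j (by simp [hj]))

theorem passR_eq (l : List Int) : ∀ (a : Int),
    ((List.range l.length).reverse).foldl pvStepR (l ++ [a]) = a :: l := by
  induction l using List.reverseRecOn with
  | nil => intro a; simp
  | append_singleton t b ih =>
    intro a
    rw [List.length_append, List.length_singleton, List.range_succ, List.reverse_append]
    simp only [List.reverse_cons, List.reverse_nil, List.nil_append, List.cons_append,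
      List.foldl_cons]
    have hstep : pvStepR ((t ++ [b]) ++ [a]) t.length = (t ++ [a]) ++ [b] := by
      rw [List.append_assoc, List.append_assoc]
      exact pvStepR_last_swap t b a
    rw [hstep, foldl_stepR_append ((List.range t.length).reverse) (t ++ [a]) b
        (fun i hi => by
          simp only [List.mem_reverse, List.mem_range] at hi
          simp only [List.length_append, List.length_singleton]
          omega)]
    rw [ih a]
    simp

theorem passA2_rotate (w : List Int) :
    ((List.range (w.length - 1)).reverse).foldl pvStepR w = w.rotate (w.length - 1) := by
  induction w using List.reverseRecOn with
  | nil => simp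
  | append_singleton l a _ =>
    rw [List.length_append, List.length_singleton]
    simp only [Nat.add_sub_cancel]
    rw [passR_eq l a, List.rotate_eq_drop_append_take (by simp)]
    simp

theorem rotate_short (w : List Int) (m : Nat) (h : w.length ≤ 1) : w.rotate m = w := by
  cases w with
  | nil => simp
  | cons a l =>
    have : l = [] := by
      cases l with
      | nil => rfl
      | cons b t => simp at h
    subst this
    rw [← List.rotate_mod]
    simp

theorem foldA1 : ∀ (t : List Int) (w : List Int),
    t.foldl (fun w _ => (List.range' 1 (w.length - 1)).foldl pvStepL w) w = w.rotate t.length := by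
  intro t
  induction t with
  | nil => intro w; simp
  | cons x t ih =>
    intro w
    rw [List.foldl_cons, passA1_rotate, ih, List.rotate_rotate, List.length_cons, Nat.add_comm]

theorem foldA2 : ∀ (t : List Int) (w : List Int),
    t.foldl (fun w _ => ((List.range (w.length - 1)).reverse).foldl pvStepR w) w
      = w.rotate (t.length * (w.length - 1)) := by
  intro t
  induction t with
  | nil => intro w; simp
  | cons x t ih =>
    intro w
    rw [List.foldl_cons, passA2_rotate, ih, List.length_rotate, List.rotate_rotate,
        List.length_cons, Nat.succ_mul, Nat.add_comm]

-- ===== VERDICT (by name: the statement is the Claim_ definition above) =====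
theorem RotWord_spec : Claim_equal_RotWord := by
  intro word r d _
  unfold Spec_RotWord RotWord RotWord_alt
  by_cases hr : r > 0
  · by_cases hd1 : d = 1
    · subst hd1
      simp only [reduceIte, true_or, and_true]
      rw [foldA1, PySem.List.length_pyRange_one]
      by_cases hn : (word.length : Int) > 1
      · rw [if_pos ⟨hr, hn⟩]
        have hlen : (0:Int) < (word.length : Int) := by omega
        have hk : PySem.Int.mod r (word.length : Int) = r % (word.length : Int) :=
          PySem.Int.mod_eq_emod_of_pos hlen
        rw [hk]
        have hk0 : (0:Int) ≤ r % (word.length : Int) := Int.emod_nonneg r (by omega)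
        have hklt : r % (word.length : Int) < (word.length : Int) := Int.emod_lt_of_pos r hlen
        rw [PySem.List.slice_from _ hk0, PySem.List.slice_to _ hk0]
        rw [← List.rotate_eq_drop_append_take (by omega)]
        rw [← List.rotate_mod word (r - 0).toNat]
        congr 1
        have h1 : (((r - 0).toNat % word.length : Nat) : Int) = r % (word.length : Int) := by
          push_cast
          congr 1
          omega
        have h2 : (((r % (word.length : Int)).toNat : Nat) : Int) = r % (word.length : Int) :=
          Int.toNat_of_nonneg hk0
        exact Int.natCast_inj.mp (h1.trans h2.symm)
      · rw [if_neg (by omega)]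
        exact rotate_short word _ (by omega)
    · by_cases hd2 : d = 2
      · subst hd2
        simp only [if_neg (show ¬(2:Int) = 1 by norm_num), reduceIte, or_true, and_true]
        rw [foldA2, PySem.List.length_pyRange_one]
        by_cases hn : (word.length : Int) > 1
        · rw [if_pos ⟨hr, hn⟩]
          have hlen : (0:Int) < (word.length : Int) := by omega
          have hk : PySem.Int.mod (-r) (word.length : Int) = (-r) % (word.length : Int) :=
            PySem.Int.mod_eq_emod_of_pos hlen
          rw [hk]
          have hk0 : (0:Int) ≤ (-r) % (word.length : Int) := Int.emod_nonneg _ (by omega)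
          have hklt : (-r) % (word.length : Int) < (word.length : Int) := Int.emod_lt_of_pos _ hlen
          rw [PySem.List.slice_from _ hk0, PySem.List.slice_to _ hk0]
          rw [← List.rotate_eq_drop_append_take (by omega)]
          rw [← List.rotate_mod word ((r - 0).toNat * (word.length - 1))]
          congr 1
          -- modular arithmetic: r.toNat * (len - 1) ≡ -r (mod len)
          have hcast : (((r - 0).toNat * (word.length - 1) : Nat) : Int)
              = ((r - 0).toNat : Int) * ((word.length : Int) - 1) := by
            push_cast [Nat.cast_sub (by omega : 1 ≤ word.length)]
            ring
          have key : (((r - 0).toNat * (word.length - 1) : Nat) : Int) % (word.length : Int)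
              = (-((r - 0).toNat : Int)) % (word.length : Int) := by
            rw [hcast, show ((r - 0).toNat : Int) * ((word.length : Int) - 1)
                = (-((r - 0).toNat : Int)) + (word.length : Int) * ((r - 0).toNat : Int) by ring,
                Int.add_mul_emod_self_left]
          have h1 : ((((r - 0).toNat * (word.length - 1)) % word.length : Nat) : Int)
              = (-((r - 0).toNat : Int)) % (word.length : Int) := by
            push_cast at key ⊢
            omega
          have h2 : ((((-r) % (word.length : Int)).toNat : Nat) : Int)
              = (-((r - 0).toNat : Int)) % (word.length : Int) := by
            rw [Int.toNat_of_nonneg hk0]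
            congr 1
            omega
          exact Int.natCast_inj.mp (h1.trans h2.symm)
        · rw [if_neg (by omega)]
          exact rotate_short word _ (by omega)
      · -- direction not 1 or 2: every pass is a no-op
        rw [if_neg (by omega)]
        have : ∀ (t : List Int) (w : List Int),
            t.foldl (fun w _ => if d = 1 then (List.range' 1 (w.length - 1)).foldl pvStepL w
              else if d = 2 then ((List.range (w.length - 1)).reverse).foldl pvStepR w else w) w = w := by
          intro t
          induction t with
          | nil => intro w; rfl
          | cons x t ih => intro w; rw [List.foldl_cons, if_neg hd1, if_neg hd2]; exact ih w
        exact this _ word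
  · -- repetation ≤ 0: the outer loop body never runs
    rw [PySem.List.pyRange_one_eq_nil (by omega), List.foldl_nil, if_neg (by omega)]
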